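-- pv_equiv track=rewrite | github.com/QuHarmonics/Nexus-4-Framework-Recursive-Harmonic-Architecture | Python Code - Raw Dump/Nexus 4 Framework -SHA-data-code_8- Qu Harmonics.py | simulate_fold_steps
-- ===== SOURCE A (Python) =====
-- def simulate_fold_steps(steps=30):
--     widths = []
--     C = 2
--     for i in range(steps):
--         if i % 3 == 0:
--             C = 2 * C  # Reflective hinge
--         else:
--             C = max(2, C // 2)
--         widths.append(C)
--     return widths
-- ===== SOURCE B (Python) =====
-- def simulate_fold_steps(steps=30):
--     # The recurrence collapses to a fixed period-3 pattern: 4 at i%3==0, else 2.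
--     return [4 if i % 3 == 0 else 2 for i in range(steps)]
-- ===== Notes on version B (the rewrite author's own statement) =====
-- stated objective: simpler
-- what changed: Replaced the stateful doubling/halving recurrence (running variable C with max and floor division) by a closed-form per-index comprehension: element i is 4 when i is a multiple of 3, else 2.
import Mathlib
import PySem

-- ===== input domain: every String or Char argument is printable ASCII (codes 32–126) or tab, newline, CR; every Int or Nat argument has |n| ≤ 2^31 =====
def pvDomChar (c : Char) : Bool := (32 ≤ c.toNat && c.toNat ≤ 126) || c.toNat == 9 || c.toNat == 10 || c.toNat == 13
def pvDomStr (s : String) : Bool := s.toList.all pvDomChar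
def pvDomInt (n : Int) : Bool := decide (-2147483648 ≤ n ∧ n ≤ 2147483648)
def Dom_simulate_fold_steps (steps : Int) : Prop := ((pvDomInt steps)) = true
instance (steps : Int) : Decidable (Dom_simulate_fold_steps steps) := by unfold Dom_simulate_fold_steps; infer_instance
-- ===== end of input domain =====

-- B replaces A's stateful doubling/halving recurrence by the closed form
-- "4 if i % 3 == 0 else 2" per index (simpler; same cost).


-- ===== PORT A =====
-- literal transliteration: widths list and running C folded over range(steps)
def simulate_fold_steps (steps : Int) : List Int :=
  ((PySem.List.pyRange 0 steps 1).foldl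
    (fun (s : List Int × Int) i =>
      let C : Int := if PySem.Int.mod i 3 == 0 then 2 * s.2
                     else max 2 (PySem.Int.floordiv s.2 2)
      (s.1 ++ [C], C))
    ([], 2)).1

-- ===== PORT B =====
def simulate_fold_steps_alt (steps : Int) : List Int :=
  (PySem.List.pyRange 0 steps 1).map (fun i => if PySem.Int.mod i 3 == 0 then 4 else 2)

-- ===== PRECONDITION & SPEC =====
def Spec_simulate_fold_steps (steps : Int) (out : List Int) : Prop := out = simulate_fold_steps_alt steps
instance (steps : Int) (out : List Int) : Decidable (Spec_simulate_fold_steps steps out) := by unfold Spec_simulate_fold_steps; infer_instance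

-- ===== CLAIM (what is proved, stated in full; the proofs are below) =====
def Claim_equal_simulate_fold_steps : Prop := ∀ (steps : Int), Dom_simulate_fold_steps steps → Spec_simulate_fold_steps steps (simulate_fold_steps steps)

-- ===== LEMMAS AND PROOFS =====

-- step function of A's loop, named for the proofs
def pvStepA (s : List Int × Int) (i : Int) : List Int × Int :=
  let C : Int := if PySem.Int.mod i 3 == 0 then 2 * s.2
                 else max 2 (PySem.Int.floordiv s.2 2)
  (s.1 ++ [C], C)

-- the value of C after processing 0..n-1
def pvC (n : Nat) : Int := if n % 3 = 1 then 4 else 2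

lemma pvStepA_eq (s : List Int × Int) (i : Int) :
    (fun (s : List Int × Int) i =>
      let C : Int := if PySem.Int.mod i 3 == 0 then 2 * s.2
                     else max 2 (PySem.Int.floordiv s.2 2)
      (s.1 ++ [C], C)) s i = pvStepA s i := rfl

lemma pvmod (n : Nat) : (PySem.Int.mod (n : Int) 3 == 0) = decide (n % 3 = 0) := by
  have : PySem.Int.mod (n : Int) 3 = ((n % 3 : Nat) : Int) := by
    simp [PySem.Int.mod, Int.fmod_eq_emod]
  rw [this]
  by_cases h : n % 3 = 0 <;> simp [h] <;> omega

lemma pv_newC (n : Nat) :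
    (if PySem.Int.mod (n : Int) 3 == 0 then 2 * pvC n
     else max 2 (PySem.Int.floordiv (pvC n) 2)) = if n % 3 = 0 then (4 : Int) else 2 := by
  rw [pvmod]
  have h3 : n % 3 = 0 ∨ n % 3 = 1 ∨ n % 3 = 2 := by omega
  rcases h3 with h | h | h <;> simp [h, pvC, PySem.Int.floordiv]

lemma pvC_succ (n : Nat) : pvC (n + 1) = if n % 3 = 0 then (4 : Int) else 2 := by
  unfold pvC
  by_cases h : n % 3 = 0 <;> [simp [Nat.add_mod, h]; skip]
  have h3 : n % 3 = 1 ∨ n % 3 = 2 := by omega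
  rcases h3 with h1 | h1 <;> simp [Nat.add_mod, h1]

lemma pv_invariant (n : Nat) :
    (PySem.List.pyRange 0 (n : Int) 1).foldl pvStepA ([], 2)
      = ((PySem.List.pyRange 0 (n : Int) 1).map (fun i => if PySem.Int.mod i 3 == 0 then 4 else 2), pvC n) := by
  induction n with
  | zero => simp [PySem.List.pyRange_one_eq_nil, pvC]
  | succ n ih =>
      have h : PySem.List.pyRange 0 ((n : Int) + 1) 1
          = PySem.List.pyRange 0 (n : Int) 1 ++ [(n : Int)] := by
        exact PySem.List.pyRange_one_succ_right (by positivity)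
      push_cast
      rw [h, List.foldl_append, List.map_append, ih]
      simp only [List.foldl_cons, List.foldl_nil, pvStepA, List.map_cons, List.map_nil]
      rw [pv_newC, pvC_succ, pvmod]
      by_cases hn : n % 3 = 0 <;> simp [hn]

-- ===== VERDICT (by name: the statement is the Claim_ definition above) =====
theorem simulate_fold_steps_spec : Claim_equal_simulate_fold_steps := by
  intro steps _
  unfold Spec_simulate_fold_steps simulate_fold_steps simulate_fold_steps_alt
  by_cases h : steps ≤ 0
  · rw [PySem.List.pyRange_one_eq_nil h]; rfl
  · have hsn : steps = ((steps.toNat : Nat) : Int) := by omega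
    rw [hsn]
    simp only [pvStepA_eq]
    rw [pv_invariant steps.toNat]
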